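-- pv_equiv track=rewrite | github.com/Hamiltonxx/pyalgorithms | algorithmic_thinking_puzzles/bitwise/problems.py | longest_sequence_with_one_flip
-- ===== SOURCE A (Python) =====
-- def longest_sequence_with_one_flip(num):
--     l = 0
--     zeros = 0
--     b = bin(num)[2:]
--     for r,x in enumerate(b):
--         if x == '0':
--             zeros += 1
--         if zeros > 1:
--             if b[l] == '0':
--                 zeros -= 1
--             l += 1
--     return r - l + 1
-- ===== SOURCE B (Python) =====
-- def longest_sequence_with_one_flip(num):
--     b = bin(num)[2:]
--     cur = prev = best = 0
--     for x in b:
--         if x == '0':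
--             prev, cur = cur, 0
--         else:
--             cur += 1
--         best = max(best, prev + cur + 1)
--     return min(best, len(b))
-- ===== Notes on version B (the rewrite author's own statement) =====
-- stated objective: alternative
-- what changed: Replaced the two-pointer sliding window (which re-reads b[l] and tracks a zero count) by a single forward scan tracking the current run of ones, the run of ones before the last zero, and a running maximum, capped by the bit length.
import Mathlib
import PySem

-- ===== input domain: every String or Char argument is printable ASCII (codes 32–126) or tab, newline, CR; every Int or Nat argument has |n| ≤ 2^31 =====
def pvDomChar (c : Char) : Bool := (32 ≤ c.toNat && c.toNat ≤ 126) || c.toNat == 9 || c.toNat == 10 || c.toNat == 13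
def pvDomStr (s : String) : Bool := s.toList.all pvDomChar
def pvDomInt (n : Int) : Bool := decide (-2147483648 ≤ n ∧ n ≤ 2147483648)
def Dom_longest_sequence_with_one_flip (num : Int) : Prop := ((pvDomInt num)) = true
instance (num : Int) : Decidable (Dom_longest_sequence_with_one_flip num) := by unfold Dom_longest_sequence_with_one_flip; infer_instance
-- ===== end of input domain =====

-- B replaces A's two-pointer sliding window by a single forward scan tracking the current
-- run of ones, the run before the last zero and a running maximum capped by the bit length
-- (objective: alternative decomposition, same cost).

-- ===== PORT A =====
-- bin(n) for a natural n ≥ 1, digit list (exact: binary digits, most significant first)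
def natBinAux (n : Nat) : List Char :=
  if h : n = 0 then [] else natBinAux (n / 2) ++ [if n % 2 = 1 then '1' else '0']
decreasing_by exact Nat.div_lt_self (Nat.pos_of_ne_zero h) Nat.one_lt_two

def natBin (n : Nat) : List Char := if n = 0 then ['0'] else natBinAux n

-- bin(num)[2:] : for num ≥ 0 this is the digit string, for num < 0 Python gives '-0b…'[2:] = 'b' ++ digits
def pyBinTail (num : Int) : List Char :=
  if num < 0 then 'b' :: natBin num.natAbs else natBin num.natAbs

def longest_sequence_with_one_flip (num : Int) : Int :=
  let b := pyBinTail num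
  let s := (PySem.List.enumerate b).foldl (fun (s : Int × Int) (rx : Int × Char) =>
      let zeros := if rx.2 = '0' then s.2 + 1 else s.2
      if zeros > 1 then
        (s.1 + 1, if PySem.List.pyGet? b s.1 = some '0' then zeros - 1 else zeros)
      else (s.1, zeros)) ((0 : Int), (0 : Int))
  -- after the loop r = len(b) - 1 (b = bin(num)[2:] is never empty, so the loop always runs)
  (↑b.length - 1) - s.1 + 1

-- ===== PORT B =====
def longest_sequence_with_one_flip_alt (num : Int) : Int :=
  let b := pyBinTail num
  let s := b.foldl (fun (s : Int × Int × Int) (x : Char) =>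
      let cp : Int × Int := if x = '0' then (0, s.1) else (s.1 + 1, s.2.1)
      (cp.1, cp.2, max s.2.2 (cp.2 + cp.1 + 1))) ((0 : Int), (0 : Int), (0 : Int))
  min s.2.2 ↑b.length

-- ===== PRECONDITION & SPEC =====
def Spec_longest_sequence_with_one_flip (num : Int) (out : Int) : Prop := out = longest_sequence_with_one_flip_alt num
instance (num : Int) (out : Int) : Decidable (Spec_longest_sequence_with_one_flip num out) := by unfold Spec_longest_sequence_with_one_flip; infer_instance

-- ===== CLAIM (what is proved, stated in full; the proofs are below) =====
def Claim_equal_longest_sequence_with_one_flip : Prop := ∀ (num : Int), Dom_longest_sequence_with_one_flip num → Spec_longest_sequence_with_one_flip num (longest_sequence_with_one_flip num)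

-- ===== LEMMAS AND PROOFS =====

-- abstract step functions (definitionally the two ports' loop bodies)
def stepA (b : List Char) (s : Int × Int) (x : Char) : Int × Int :=
  let zeros := if x = '0' then s.2 + 1 else s.2
  if zeros > 1 then
    (s.1 + 1, if PySem.List.pyGet? b s.1 = some '0' then zeros - 1 else zeros)
  else (s.1, zeros)

def stepB (s : Int × Int × Int) (x : Char) : Int × Int × Int :=
  let cp : Int × Int := if x = '0' then (0, s.1) else (s.1 + 1, s.2.1)
  (cp.1, cp.2, max s.2.2 (cp.2 + cp.1 + 1))

-- All invariants are stated on the REVERSED processed prefix r (suffixes of the prefix = prefixes of r).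
def trailR : List Char → Nat
  | [] => 0
  | c :: t => if c = '0' then 0 else trailR t + 1

def preR : List Char → Nat
  | [] => 0
  | c :: t => if c = '0' then trailR t else preR t

-- length of the longest prefix of r containing at most one '0'
def ER : List Char → Nat
  | [] => 0
  | c :: t => if c = '0' then trailR t + 1 else min (ER t + 1) (t.length + 1)

lemma trailR_le (r : List Char) : trailR r ≤ r.length := by
  induction r with
  | nil => simp [trailR]
  | cons c t ih => simp only [trailR, List.length_cons]; split <;> omega

lemma count_take_trailR (r : List Char) : (r.take (trailR r)).count '0' = 0 := by
  induction r with
  | nil => simp [trailR]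
  | cons c t ih =>
    by_cases h : c = '0' <;> simp [trailR, h, List.count_cons, ih]

lemma le_trailR_of (r : List Char) (m : Nat) (hm : m ≤ r.length)
    (h : (r.take m).count '0' = 0) : m ≤ trailR r := by
  induction r generalizing m with
  | nil => simp at hm; omega
  | cons c t ih =>
    cases m with
    | zero => omega
    | succ k =>
      simp only [List.take_succ_cons, List.count_cons] at h
      by_cases hc : c = '0'
      · simp [hc] at h
      · simp only [trailR, if_neg hc]
        have := ih k (by simpa using hm) (by simp [hc] at h; omega)
        omega

lemma ER_le (r : List Char) : ER r ≤ r.length := by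
  induction r with
  | nil => simp [ER]
  | cons c t ih =>
    simp only [ER, List.length_cons]
    have := trailR_le t
    split <;> omega

lemma count_take_mono (r : List Char) (c : Char) (a b : Nat) (hab : a ≤ b) :
    (r.take a).count c ≤ (r.take b).count c := by
  have h1 : r.take a = (r.take b).take a := by
    rw [List.take_take, Nat.min_eq_left hab]
  rw [h1]
  exact (List.take_sublist a (r.take b)).count_le c

lemma count_take_le (r : List Char) (c : Char) (a : Nat) :
    (r.take a).count c ≤ r.count c :=
  (List.take_sublist a r).count_le c

lemma count_take_ER (r : List Char) : (r.take (ER r)).count '0' ≤ 1 := by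
  induction r with
  | nil => simp [ER]
  | cons c t ih =>
    by_cases hc : c = '0'
    · simp [ER, hc, List.count_cons, count_take_trailR t]
    · have h1 : ER (c :: t) = (min (ER t) t.length) + 1 := by
        simp only [ER, if_neg hc]; omega
      rw [h1]
      simp only [List.take_succ_cons, List.count_cons]
      have := count_take_mono t '0' (min (ER t) t.length) (ER t) (Nat.min_le_left _ _)
      simp [hc]
      omega

lemma le_ER_of (r : List Char) (m : Nat) (hm : m ≤ r.length)
    (h : (r.take m).count '0' ≤ 1) : m ≤ ER r := by
  induction r generalizing m with
  | nil => simp at hm; omega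
  | cons c t ih =>
    cases m with
    | zero => omega
    | succ k =>
      simp only [List.take_succ_cons, List.count_cons] at h
      by_cases hc : c = '0'
      · have h0 : (t.take k).count '0' = 0 := by simp [hc] at h; omega
        have := le_trailR_of t k (by simpa using hm) h0
        simp only [ER, if_pos hc]; omega
      · have := ih k (by simpa using hm) (by simp [hc] at h; omega)
        have hk : k ≤ t.length := by simpa using hm
        simp only [ER, if_neg hc]; omega

lemma trailR_le_ER (r : List Char) : trailR r ≤ ER r :=
  le_ER_of r _ (trailR_le r) (by simp [count_take_trailR])

lemma ER_cons_le (x : Char) (r : List Char) : ER (x :: r) ≤ ER r + 1 := by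
  by_cases hx : x = '0'
  · simp only [ER, if_pos hx]
    have := trailR_le_ER r; omega
  · simp only [ER, if_neg hx]; omega

lemma ER_of_count_pos (r : List Char) (h : 1 ≤ r.count '0') :
    ER r = preR r + trailR r + 1 := by
  induction r with
  | nil => simp at h
  | cons c t ih =>
    by_cases hc : c = '0'
    · simp [ER, preR, trailR, hc]
    · have ht : 1 ≤ t.count '0' := by simpa [List.count_cons, hc] using h
      have h1 := ih ht
      have h2 := ER_le t
      simp only [ER, preR, trailR, if_neg hc]
      omega

lemma all_ones (r : List Char) (h : r.count '0' = 0) :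
    trailR r = r.length ∧ preR r = 0 ∧ ER r = r.length := by
  induction r with
  | nil => simp [trailR, preR, ER]
  | cons c t ih =>
    have hc : ¬ c = '0' := by
      intro hc; simp [List.count_cons, hc] at h
    have ht : t.count '0' = 0 := by simpa [List.count_cons, hc] using h
    obtain ⟨h1, h2, h3⟩ := ih ht
    refine ⟨?_, ?_, ?_⟩ <;> simp [trailR, preR, ER, hc, h1, h2, h3]

lemma count_take_succ (r : List Char) (m : Nat) (hm : m < r.length) :
    (r.take (m + 1)).count '0' =
      (r.take m).count '0' + (if r[m] = '0' then 1 else 0) := by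
  rw [List.take_add_one, List.count_append, List.getElem?_eq_getElem hm]
  by_cases h : r[m] = '0' <;> simp [h]

-- the joint invariant: r is the reversed processed prefix, sA/sB the two loop states,
-- W the size of A's window
def JInv (r : List Char) (sA : Int × Int) (sB : Int × Int × Int) (W : Nat) : Prop :=
  1 ≤ W ∧ W ≤ r.length ∧
  sA.1 = ((r.length - W : Nat) : Int) ∧
  sA.2 = (((r.take W).count '0' : Nat) : Int) ∧
  sB.1 = (trailR r : Int) ∧
  sB.2.1 = (preR r : Int) ∧
  (∃ bn : Nat, sB.2.2 = (bn : Int) ∧ min bn r.length = W ∧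
    (bn ≤ r.length ∨ (bn = r.length + 1 ∧ r.count '0' = 0))) ∧
  ER r ≤ W

lemma init_inv (b : List Char) (x : Char) :
    JInv [x] (stepA b (0, 0) x) (stepB (0, 0, 0) x) 1 := by
  by_cases hx : x = '0'
  · simp [JInv, stepA, stepB, hx, trailR, preR, ER, List.count_cons]
    exact ⟨1, by norm_num⟩
  · simp [JInv, stepA, stepB, hx, trailR, preR, ER, List.count_cons]
    exact ⟨2, by norm_num⟩
  
lemma step_inv (b p rest : List Char) (x : Char) (hb : b = p ++ x :: rest)
    (sA : Int × Int) (sB : Int × Int × Int) (W : Nat)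
    (h : JInv p.reverse sA sB W) :
    ∃ W', JInv (x :: p.reverse) (stepA b sA x) (stepB sB x) W' := by
  obtain ⟨hW1, hWn, hl, hz, hcur, hprev, ⟨bn, hbn, hmin, hbnR⟩, hER⟩ := h
  set r := p.reverse with hr
  have hn : r.length = p.length := by simp [hr]
  set n := r.length with hnn
  set z : Nat := (r.take W).count '0' with hzdef
  set z1 : Nat := z + (if x = '0' then 1 else 0) with hz1def
  have htake1 : ((x :: r).take (W + 1)).count '0' = z1 := by
    by_cases hx : x = '0' <;>
      simp [List.take_succ_cons, List.count_cons, hx, hz1def, hzdef]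
  have hzeros : (if x = '0' then sA.2 + 1 else sA.2) = (z1 : Int) := by
    by_cases hx : x = '0' <;> simp [hx, hz, hz1def, ← hzdef]
  have hstepB : stepB sB x = ((trailR (x :: r) : Int), (preR (x :: r) : Int),
      ((max bn (preR (x :: r) + trailR (x :: r) + 1) : Nat) : Int)) := by
    by_cases hx : x = '0' <;>
      simp [stepB, hx, trailR, preR, hcur, hprev, hbn, Nat.cast_max]
  by_cases hcase : z1 ≤ 1
  · -- the window grows: W' = W + 1
    have hstep : stepA b sA x = (sA.1, (z1 : Int)) := by
      simp only [stepA]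
      rw [hzeros, if_neg (by omega)]
    have hzle : z ≤ 1 := by omega
    have hEeq : ER r = W :=
      le_antisymm hER (le_ER_of r W hWn (by rw [← hzdef]; omega))
    have hER'le : ER (x :: r) ≤ W + 1 := le_trans (ER_cons_le x r) (by omega)
    have hER'ge : W + 1 ≤ ER (x :: r) :=
      le_ER_of _ _ (by simp [← hnn]; omega) (by rw [htake1]; omega)
    have hER' : ER (x :: r) = W + 1 := le_antisymm hER'le hER'ge
    refine ⟨W + 1, ?_, by simp [← hnn]; omega, ?_, ?_, ?_, ?_, ?_, by rw [hER']⟩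
    · omega
    · rw [hstep, hl]
      have hx1 : (x :: r).length - (W + 1) = n - W := by simp [← hnn]
      rw [hx1]
    · rw [hstep, htake1]
    · rw [hstepB]
    · rw [hstepB]
    · rw [hstepB]
      by_cases hc0 : (x :: r).count '0' = 0
      · obtain ⟨ht', hp', hE'⟩ := all_ones (x :: r) hc0
        have hWon : W = n := by
          simp [← hnn] at hE'
          omega
        refine ⟨max bn (preR (x :: r) + trailR (x :: r) + 1), rfl, ?_, Or.inr ⟨?_, hc0⟩⟩ <;>
          · simp [ht', hp', ← hnn] at *
            rcases hbnR with hb1 | ⟨hb1, _⟩ <;> omega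
      · have hc1 : 1 ≤ (x :: r).count '0' := by omega
        have hpc : preR (x :: r) + trailR (x :: r) + 1 = W + 1 := by
          rw [← ER_of_count_pos _ hc1, hER']
        refine ⟨max bn (preR (x :: r) + trailR (x :: r) + 1), rfl, ?_, Or.inl ?_⟩ <;>
          · rw [hpc]; simp [← hnn]
            rcases hbnR with hb1 | ⟨hb1, _⟩ <;> omega
  · -- the window shifts: W' = W
    have hz1ge : 2 ≤ z1 := by omega
    set i : Nat := n - W with hidef
    have hiplen : i < p.length := by omega
    have hirlen : W - 1 < r.length := by omega
    have hget : PySem.List.pyGet? b sA.1 = some (p[i]'hiplen) := by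
      rw [hl, PySem.List.pyGet?_natCast, hb,
        List.getElem?_append_left hiplen, List.getElem?_eq_getElem hiplen]
    have hpr : p[i]'hiplen = r[W - 1]'hirlen := by
      have h1 : r[W - 1]'hirlen = p.reverse[W - 1]'(by rw [← hr]; exact hirlen) := by
        simp [hr]
      rw [h1, List.getElem_reverse]
      congr 1
      simp [hr, ← hnn] at *
      omega
    have hxrlen : W < (x :: r).length := by simp [← hnn]; omega
    have hrr : (x :: r)[W]'hxrlen = r[W - 1]'hirlen := by
      obtain ⟨k, rfl⟩ : ∃ k, W = k + 1 := ⟨W - 1, by omega⟩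
      simp
    have hcount' : ((x :: r).take W).count '0' + (if r[W - 1]'hirlen = '0' then 1 else 0) = z1 := by
      rw [← htake1, count_take_succ (x :: r) W hxrlen, hrr]
    have hstep : stepA b sA x = (sA.1 + 1, (((x :: r).take W).count '0' : Int)) := by
      simp only [stepA]
      rw [hzeros, if_pos (by omega), hget, hpr]
      by_cases hc : r[W - 1]'hirlen = '0' <;> simp [hc] at hcount' ⊢ <;> omega
    have hERle : ER (x :: r) ≤ W := by
      by_contra hlt
      push Not at hlt
      have h1 := count_take_mono (x :: r) '0' (W + 1) (ER (x :: r)) (by omega)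
      have h2 := count_take_ER (x :: r)
      rw [htake1] at h1
      omega
    have hcr : z1 ≤ (x :: r).count '0' := by
      rw [← htake1]; exact count_take_le _ _ _
    refine ⟨W, ?_, by simp [← hnn]; omega, ?_, ?_, ?_, ?_, ?_, hERle⟩
    · omega
    · rw [hstep, hl]; simp [← hnn]; push_cast; omega
    · rw [hstep]
    · rw [hstepB]
    · rw [hstepB]
    · rw [hstepB]
      have hpc : preR (x :: r) + trailR (x :: r) + 1 = ER (x :: r) :=
        (ER_of_count_pos _ (by omega)).symm
      have hzler : z ≤ r.count '0' := by rw [hzdef]; exact count_take_le _ _ _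
      refine ⟨max bn (preR (x :: r) + trailR (x :: r) + 1), rfl, ?_, Or.inl ?_⟩ <;>
        · rw [hpc]; simp [← hnn]
          rcases hbnR with hb1 | ⟨hb1, hb2⟩ <;> omega

lemma fold_inv (b : List Char) : ∀ (rest p : List Char) (sA : Int × Int)
    (sB : Int × Int × Int) (W : Nat), b = p ++ rest → JInv p.reverse sA sB W →
    ∃ W', JInv ((p ++ rest).reverse) (rest.foldl (stepA b) sA) (rest.foldl stepB sB) W' := by
  intro rest
  induction rest with
  | nil => intro p sA sB W hb h; exact ⟨W, by simpa using h⟩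
  | cons x rest ih =>
    intro p sA sB W hb h
    obtain ⟨W1, h1⟩ := step_inv b p rest x hb sA sB W h
    have h2 : (x :: p.reverse) = (p ++ [x]).reverse := by simp
    rw [h2] at h1
    obtain ⟨W', hW'⟩ := ih (p ++ [x]) _ _ W1 (by simpa using hb) h1
    refine ⟨W', ?_⟩
    simpa using hW'

lemma natBin_ne_nil (n : Nat) : natBin n ≠ [] := by
  unfold natBin
  split
  · simp
  · rw [natBinAux]
    simp_all

lemma pyBinTail_ne_nil (num : Int) : pyBinTail num ≠ [] := by
  unfold pyBinTail
  split
  · simp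
  · exact natBin_ne_nil _

lemma enum_foldl (b : List Char) (l : List Char) (i : Int) (s : Int × Int) :
    (PySem.List.enumerate l i).foldl (fun s rx => stepA b s rx.2) s
      = l.foldl (stepA b) s := by
  induction l generalizing i s with
  | nil => simp [PySem.List.enumerate_nil]
  | cons c t ih => simp [PySem.List.enumerate_cons, ih]

-- ===== VERDICT (by name: the statement is the Claim_ definition above) =====
theorem longest_sequence_with_one_flip_spec : Claim_equal_longest_sequence_with_one_flip := by
  intro num _
  unfold Spec_longest_sequence_with_one_flip
  unfold longest_sequence_with_one_flip longest_sequence_with_one_flip_alt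
  set b := pyBinTail num with hbdef
  obtain ⟨x, rest, hb⟩ : ∃ x rest, b = x :: rest := by
    cases hb : b with
    | nil => exact absurd hb (pyBinTail_ne_nil num)
    | cons x rest => exact ⟨x, rest, rfl⟩
  have hfa : (PySem.List.enumerate b 0).foldl (fun (s : Int × Int) (rx : Int × Char) =>
      let zeros := if rx.2 = '0' then s.2 + 1 else s.2
      if zeros > 1 then
        (s.1 + 1, if PySem.List.pyGet? b s.1 = some '0' then zeros - 1 else zeros)
      else (s.1, zeros)) ((0 : Int), (0 : Int)) = b.foldl (stepA b) (0, 0) :=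
    enum_foldl b b 0 (0, 0)
  have hfb : b.foldl (fun (s : Int × Int × Int) (x : Char) =>
      let cp : Int × Int := if x = '0' then (0, s.1) else (s.1 + 1, s.2.1)
      (cp.1, cp.2, max s.2.2 (cp.2 + cp.1 + 1))) ((0:Int), (0:Int), (0:Int))
      = b.foldl stepB (0, 0, 0) := rfl
  simp only [hfa, hfb]
  have hstart : b.foldl (stepA b) (0, 0) = rest.foldl (stepA b) (stepA b (0, 0) x) := by
    rw [hb]; rfl
  have hstartB : b.foldl stepB (0, 0, 0) = rest.foldl stepB (stepB (0, 0, 0) x) := by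
    rw [hb]; rfl
  obtain ⟨W, hI⟩ := fold_inv b rest [x] (stepA b (0, 0) x) (stepB (0, 0, 0) x) 1
    (by simpa using hb) (by simpa using init_inv b x)
  obtain ⟨hW1, hWn, hA1, _, _, _, ⟨bn, hbn, hmin, _⟩, _⟩ := hI
  rw [hstart, hstartB]
  have hlen : ([x] ++ rest).reverse.length = b.length := by simp [hb]
  rw [hlen] at hWn hA1
  have hbrest : rest.foldl (stepA b) (stepA b (0, 0) x) = ([x] ++ rest).foldl (stepA b) (0,0) := rfl
  rw [hA1, hbn, Nat.cast_sub hWn]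
  rw [hlen] at hmin
  have : min (bn : Int) (b.length : Int) = ((min bn b.length : Nat) : Int) := by
    simp [Nat.cast_min]
  rw [this, hmin]
  have hlen1 : 1 ≤ b.length := by rw [hb]; simp
  push_cast
  omega
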